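-- pv_equiv track=rewrite | github.com/ey242/KiVA | colab_helper_functions/helper_kiva_iccv.py | extract_model_answer1
-- ===== SOURCE A (Python) =====
-- def extract_model_answer1(response_text):
--   options = ["(A)", "(B)", "(C)", "(D)"]
--
--   model_option = None
--   earliest_index = len(response_text)
--
--   for option in options:
--       idx = response_text.find(option)
--       if idx != -1 and idx < earliest_index:
--           earliest_index = idx
--           model_option = option
--
--   return model_option if model_option else "Null"
-- ===== SOURCE B (Python) =====
-- import re
--
-- def extract_model_answer1(response_text):
--     m = re.search(r'\((A|B|C|D)\)', response_text)
--     return m.group() if m else "Null"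
-- ===== Notes on version B (the rewrite author's own statement) =====
-- stated objective: idiomatic
-- what changed: Replaces four separate str.find scans plus a running minimum-index accumulator with a single left-to-right regex search whose leftmost match is the earliest marker.
import Mathlib
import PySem

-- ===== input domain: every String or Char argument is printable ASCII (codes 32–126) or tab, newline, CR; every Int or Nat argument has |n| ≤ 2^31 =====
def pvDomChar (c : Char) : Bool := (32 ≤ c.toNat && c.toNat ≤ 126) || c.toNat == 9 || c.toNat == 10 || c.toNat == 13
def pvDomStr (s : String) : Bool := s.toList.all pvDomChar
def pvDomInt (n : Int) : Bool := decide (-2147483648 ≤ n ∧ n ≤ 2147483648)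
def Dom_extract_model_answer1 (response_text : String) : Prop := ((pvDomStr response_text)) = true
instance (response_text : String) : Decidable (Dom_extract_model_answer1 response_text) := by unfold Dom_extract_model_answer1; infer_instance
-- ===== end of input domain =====

-- B replaces A's four str.find scans + running minimum with one left-to-right regex search (idiomatic single pass).

-- ===== PORT A =====
def extract_model_answer1 (response_text : String) : String :=
  let options : List String := ["(A)", "(B)", "(C)", "(D)"]
  let r := options.foldl (fun st option =>
      let idx := PySem.Str.find response_text option
      if idx ≠ -1 ∧ idx < st.2 then (some option, idx) else st)
    ((none : Option String), PySem.Str.len response_text)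
  match r.1 with
  | some o => o
  | none => "Null"

-- ===== PORT B =====
-- hand port of re.search(r'\((A|B|C|D)\)', text): the engine tries each start
-- position left to right, at each one trying the alternatives A,B,C,D in order;
-- the first position where one matches gives the (leftmost) match.
def pvAltScan : List Char → String
  | [] => "Null"
  | c :: rest =>
    if ['(', 'A', ')'] <+: (c :: rest) then "(A)"
    else if ['(', 'B', ')'] <+: (c :: rest) then "(B)"
    else if ['(', 'C', ')'] <+: (c :: rest) then "(C)"
    else if ['(', 'D', ')'] <+: (c :: rest) then "(D)"
    else pvAltScan rest

def extract_model_answer1_alt (response_text : String) : String :=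
  pvAltScan response_text.toList

-- ===== PRECONDITION & SPEC =====
def Spec_extract_model_answer1 (response_text : String) (out : String) : Prop := out = extract_model_answer1_alt response_text
instance (response_text : String) (out : String) : Decidable (Spec_extract_model_answer1 response_text out) := by unfold Spec_extract_model_answer1; infer_instance

-- ===== CLAIM (what is proved, stated in full; the proofs are below) =====
def Claim_equal_extract_model_answer1 : Prop := ∀ (response_text : String), Dom_extract_model_answer1 response_text → Spec_extract_model_answer1 response_text (extract_model_answer1 response_text)

-- ===== LEMMAS AND PROOFS =====

-- chars-level version of A's fold
def pvAfold (l : List Char) : Option String × Int :=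
  (["(A)", "(B)", "(C)", "(D)"] : List String).foldl (fun st option =>
      let idx := PySem.Chars.find l option.toList
      if idx ≠ -1 ∧ idx < st.2 then (some option, idx) else st)
    ((none : Option String), (l.length : Int))

-- find points at the first occurrence, hence is determined by it
lemma pv_find_unique (l p : List Char) (n : Nat) (h1 : p <+: l.drop n)
    (h2 : ∀ i, i < n → ¬ p <+: l.drop i) : PySem.Chars.find l p = n := by
  have hin : PySem.Chars.isIn p l = true :=
    (PySem.Chars.exists_prefix_drop_iff_isIn p l).1 ⟨n, h1⟩
  have hnn : 0 ≤ PySem.Chars.find l p :=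
    (PySem.Chars.find_nonneg_iff l p).2 ((PySem.Chars.isIn_iff_infix p l).1 hin)
  have hspec := PySem.Chars.find_spec (s := l) (sub := p) hnn
  rcases hspec with ⟨hpref, hmin⟩
  rcases Nat.lt_trichotomy (PySem.Chars.find l p).toNat n with h | h | h
  · exact absurd hpref (h2 _ h)
  · omega
  · exact absurd h1 (hmin n h)

lemma pv_find_ne_zero (l p : List Char) (h : ¬ p <+: l) : PySem.Chars.find l p ≠ 0 := by
  intro h0
  rcases PySem.Chars.find_spec (s := l) (sub := p) (by omega) with ⟨hpref, _⟩
  rw [h0] at hpref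
  simpa using absurd hpref h

-- on a non-match at position 0, find on c::l is the shifted find on l
lemma pv_find_cons (c : Char) (l p : List Char) (hp : ¬ p <+: (c :: l)) :
    PySem.Chars.find (c :: l) p =
      if PySem.Chars.find l p = -1 then -1 else PySem.Chars.find l p + 1 := by
  by_cases hF : PySem.Chars.find l p = -1
  · simp only [hF, if_pos]
    rw [PySem.Chars.find_eq_neg_one_iff]
    intro hinf
    rcases (PySem.Chars.exists_prefix_drop_iff_isIn p (c :: l)).2
        ((PySem.Chars.isIn_iff_infix p (c :: l)).2 hinf) with ⟨j, hj⟩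
    cases j with
    | zero => exact hp (by simpa using hj)
    | succ j' =>
      have : p <:+: l := (PySem.Chars.isIn_iff_infix p l).1
        ((PySem.Chars.exists_prefix_drop_iff_isIn p l).1 ⟨j', by simpa using hj⟩)
      exact ((PySem.Chars.find_eq_neg_one_iff l p).1 hF) this
  · have hnn : 0 ≤ PySem.Chars.find l p := by
      have := PySem.Chars.neg_one_le_find (s := l) (sub := p); omega
    rcases PySem.Chars.find_spec (s := l) (sub := p) hnn with ⟨hpref, hmin⟩
    have : PySem.Chars.find (c :: l) p = ((PySem.Chars.find l p).toNat + 1 : Nat) := by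
      apply pv_find_unique
      · simpa using hpref
      · intro i hi
        cases i with
        | zero => exact hp
        | succ i' => simpa using hmin i' (by omega)
    rw [this]
    simp only [hF, if_neg, not_false_iff]
    push_cast
    omega

-- shifting every candidate index and the threshold by one does not change which option wins
lemma pv_fold_shift (opts : List String) (f : String → Int)
    (hf : ∀ o ∈ opts, -1 ≤ f o) :
    ∀ (o0 : Option String) (e : Int), 0 ≤ e →
    opts.foldl (fun st o =>
        let idx := if f o = -1 then -1 else f o + 1
        if idx ≠ -1 ∧ idx < st.2 then (some o, idx) else st) (o0, e + 1)
    = ((opts.foldl (fun st o => if f o ≠ -1 ∧ f o < st.2 then (some o, f o) else st) (o0, e)).1,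
       (opts.foldl (fun st o => if f o ≠ -1 ∧ f o < st.2 then (some o, f o) else st) (o0, e)).2 + 1) := by
  induction opts with
  | nil => intro o0 e he; simp
  | cons o opts ih =>
    intro o0 e he
    have ho : -1 ≤ f o := hf o (by simp)
    have hf' : ∀ x ∈ opts, -1 ≤ f x := fun x hx => hf x (by simp [hx])
    simp only [List.foldl_cons]
    by_cases h1 : f o = -1
    · rw [if_neg (show ¬((if f o = -1 then (-1 : Int) else f o + 1) ≠ -1 ∧
          (if f o = -1 then (-1 : Int) else f o + 1) < e + 1) from by rw [if_pos h1]; omega),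
        if_neg (show ¬(f o ≠ -1 ∧ f o < e) from by omega)]
      exact ih hf' o0 e he
    · have hidx : (if f o = -1 then (-1 : Int) else f o + 1) = f o + 1 := if_neg h1
      rw [hidx]
      by_cases h2 : f o < e
      · rw [if_pos (show (f o + 1 ≠ -1 ∧ f o + 1 < e + 1) from ⟨by omega, by omega⟩),
          if_pos (show (f o ≠ -1 ∧ f o < e) from ⟨h1, h2⟩)]
        exact ih hf' (some o) (f o) (by omega)
      · rw [if_neg (show ¬(f o + 1 ≠ -1 ∧ f o + 1 < e + 1) from by omega),
          if_neg (show ¬(f o ≠ -1 ∧ f o < e) from by omega)]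
        exact ih hf' o0 e he

lemma pv_main (l : List Char) :
    (match (pvAfold l).1 with | some o => o | none => "Null") = pvAltScan l := by
  induction l with
  | nil => decide
  | cons c l ih =>
    by_cases hA : ['(', 'A', ')'] <+: (c :: l)
    · have h0 : PySem.Chars.find (c :: l) "(A)".toList = 0 := by
        apply pv_find_unique _ _ 0 (by simpa using hA) (by intro i hi; exact absurd hi (Nat.not_lt_zero i))
      have hb := PySem.Chars.neg_one_le_find (s := c :: l) (sub := "(B)".toList)
      have hc := PySem.Chars.neg_one_le_find (s := c :: l) (sub := "(C)".toList)
      have hd := PySem.Chars.neg_one_le_find (s := c :: l) (sub := "(D)".toList)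
      have hlen : (0 : Int) < ((c :: l).length : Int) := by exact_mod_cast Nat.succ_pos l.length
      simp only [pvAfold, List.foldl_cons, List.foldl_nil, h0, pvAltScan, if_pos hA]
      split_ifs <;> first | rfl | omega
    · by_cases hB : ['(', 'B', ')'] <+: (c :: l)
      · have h0 : PySem.Chars.find (c :: l) "(B)".toList = 0 := by
          apply pv_find_unique _ _ 0 (by simpa using hB) (by intro i hi; exact absurd hi (Nat.not_lt_zero i))
        have ha := PySem.Chars.neg_one_le_find (s := c :: l) (sub := "(A)".toList)
        have ha0 : PySem.Chars.find (c :: l) "(A)".toList ≠ 0 :=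
          pv_find_ne_zero _ _ (by simpa using hA)
        have hc := PySem.Chars.neg_one_le_find (s := c :: l) (sub := "(C)".toList)
        have hd := PySem.Chars.neg_one_le_find (s := c :: l) (sub := "(D)".toList)
        have hlen : (0 : Int) < ((c :: l).length : Int) := by exact_mod_cast Nat.succ_pos l.length
        simp only [pvAfold, List.foldl_cons, List.foldl_nil, h0, pvAltScan, if_pos hB, if_neg hA]
        split_ifs <;> first | rfl | omega
      · by_cases hC : ['(', 'C', ')'] <+: (c :: l)
        · have h0 : PySem.Chars.find (c :: l) "(C)".toList = 0 := by
            apply pv_find_unique _ _ 0 (by simpa using hC) (by intro i hi; exact absurd hi (Nat.not_lt_zero i))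
          have ha := PySem.Chars.neg_one_le_find (s := c :: l) (sub := "(A)".toList)
          have ha0 : PySem.Chars.find (c :: l) "(A)".toList ≠ 0 :=
            pv_find_ne_zero _ _ (by simpa using hA)
          have hb := PySem.Chars.neg_one_le_find (s := c :: l) (sub := "(B)".toList)
          have hb0 : PySem.Chars.find (c :: l) "(B)".toList ≠ 0 :=
            pv_find_ne_zero _ _ (by simpa using hB)
          have hd := PySem.Chars.neg_one_le_find (s := c :: l) (sub := "(D)".toList)
          have hlen : (0 : Int) < ((c :: l).length : Int) := by exact_mod_cast Nat.succ_pos l.length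
          simp only [pvAfold, List.foldl_cons, List.foldl_nil, h0, pvAltScan,
            if_pos hC, if_neg hA, if_neg hB]
          split_ifs <;> first | rfl | omega
        · by_cases hD : ['(', 'D', ')'] <+: (c :: l)
          · have h0 : PySem.Chars.find (c :: l) "(D)".toList = 0 := by
              apply pv_find_unique _ _ 0 (by simpa using hD) (by intro i hi; exact absurd hi (Nat.not_lt_zero i))
            have ha := PySem.Chars.neg_one_le_find (s := c :: l) (sub := "(A)".toList)
            have ha0 : PySem.Chars.find (c :: l) "(A)".toList ≠ 0 :=
              pv_find_ne_zero _ _ (by simpa using hA)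
            have hb := PySem.Chars.neg_one_le_find (s := c :: l) (sub := "(B)".toList)
            have hb0 : PySem.Chars.find (c :: l) "(B)".toList ≠ 0 :=
              pv_find_ne_zero _ _ (by simpa using hB)
            have hc := PySem.Chars.neg_one_le_find (s := c :: l) (sub := "(C)".toList)
            have hc0 : PySem.Chars.find (c :: l) "(C)".toList ≠ 0 :=
              pv_find_ne_zero _ _ (by simpa using hC)
            have hlen : (0 : Int) < ((c :: l).length : Int) := by exact_mod_cast Nat.succ_pos l.length
            simp only [pvAfold, List.foldl_cons, List.foldl_nil, h0, pvAltScan,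
              if_pos hD, if_neg hA, if_neg hB, if_neg hC]
            split_ifs <;> first | rfl | omega
          · -- no marker starts at position 0: both sides step to l
            have hstep : ∀ o ∈ (["(A)", "(B)", "(C)", "(D)"] : List String),
                PySem.Chars.find (c :: l) o.toList =
                  if PySem.Chars.find l o.toList = -1 then -1
                  else PySem.Chars.find l o.toList + 1 := by
              intro o ho
              fin_cases ho
              · exact pv_find_cons c l _ (by simpa using hA)
              · exact pv_find_cons c l _ (by simpa using hB)
              · exact pv_find_cons c l _ (by simpa using hC)
              · exact pv_find_cons c l _ (by simpa using hD)
            have hbounds : ∀ o ∈ (["(A)", "(B)", "(C)", "(D)"] : List String),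
                -1 ≤ PySem.Chars.find l o.toList := fun o _ =>
              PySem.Chars.neg_one_le_find (s := l) (sub := o.toList)
            have hfold : pvAfold (c :: l) =
                ((pvAfold l).1, (pvAfold l).2 + 1) := by
              unfold pvAfold
              have hlen : ((c :: l).length : Int) = (l.length : Int) + 1 := by
                push_cast [List.length_cons]; ring
              rw [hlen]
              calc (["(A)", "(B)", "(C)", "(D)"] : List String).foldl
                    (fun st option =>
                      let idx := PySem.Chars.find (c :: l) option.toList
                      if idx ≠ -1 ∧ idx < st.2 then (some option, idx) else st)
                    ((none : Option String), (l.length : Int) + 1)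
                  = (["(A)", "(B)", "(C)", "(D)"] : List String).foldl
                    (fun st o =>
                      let idx := if PySem.Chars.find l o.toList = -1 then -1
                                 else PySem.Chars.find l o.toList + 1
                      if idx ≠ -1 ∧ idx < st.2 then (some o, idx) else st)
                    ((none : Option String), (l.length : Int) + 1) := by
                    simp only [List.foldl_cons, List.foldl_nil,
                      hstep "(A)" (by simp), hstep "(B)" (by simp),
                      hstep "(C)" (by simp), hstep "(D)" (by simp)]
                _ = _ := pv_fold_shift _ _ hbounds none (l.length : Int) (Int.natCast_nonneg _)
            rw [pvAltScan, if_neg hA, if_neg hB, if_neg hC, if_neg hD, ← ih, hfold]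

lemma pv_str_bridge (s : String) : extract_model_answer1 s =
    (match (pvAfold s.toList).1 with | some o => o | none => "Null") := by
  simp only [extract_model_answer1, pvAfold, PySem.Str.find_eq, PySem.Str.len_eq]

-- ===== VERDICT (by name: the statement is the Claim_ definition above) =====
theorem extract_model_answer1_spec : Claim_equal_extract_model_answer1 := by
  intro s _
  show extract_model_answer1 s = extract_model_answer1_alt s
  rw [pv_str_bridge, pv_main]
  rfl
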